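-- pv_equiv track=rewrite | github.com/Nimastic/my-Advent-of-Code-solutions | day9/compact_checksum.py | is_compaction_complete
-- ===== SOURCE A (Python) =====
-- def is_compaction_complete(layout):
--     """
--     Check if there are no free spaces ('.') that have file blocks to the right.
--     In other words, every '.' should appear after all file blocks.
--     """
--     # The condition for completion is that once we hit the first '.' from the left,
--     # there should be no file block after it.
--     first_dot = None
--     for idx, block in enumerate(layout):
--         if block == '.':
--             first_dot = idx
--             break
--
--     if first_dot is None:
--         # No free spaces at all, we are done
--         return True
--
--     # If there's a '.' found, ensure no file blocks after it
--     for idx in range(first_dot+1, len(layout)):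
--         if layout[idx] != '.':
--             return False
--     return True
-- ===== SOURCE B (Python) =====
-- def is_compaction_complete(layout):
--     # Compaction is complete iff the trailing segment of the layout holds
--     # every '.' it contains: count the frees, then test only that suffix.
--     free = layout.count('.')
--     return all(b == '.' for b in layout[len(layout)-free:])
-- ===== Notes on version B (the rewrite author's own statement) =====
-- stated objective: alternative
-- what changed: Instead of locating the first '.' and then verifying every later index (A's find-then-verify), B counts the free blocks and checks that the suffix of exactly that length is all '.', which holds iff no file block follows a free block.
import Mathlib
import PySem

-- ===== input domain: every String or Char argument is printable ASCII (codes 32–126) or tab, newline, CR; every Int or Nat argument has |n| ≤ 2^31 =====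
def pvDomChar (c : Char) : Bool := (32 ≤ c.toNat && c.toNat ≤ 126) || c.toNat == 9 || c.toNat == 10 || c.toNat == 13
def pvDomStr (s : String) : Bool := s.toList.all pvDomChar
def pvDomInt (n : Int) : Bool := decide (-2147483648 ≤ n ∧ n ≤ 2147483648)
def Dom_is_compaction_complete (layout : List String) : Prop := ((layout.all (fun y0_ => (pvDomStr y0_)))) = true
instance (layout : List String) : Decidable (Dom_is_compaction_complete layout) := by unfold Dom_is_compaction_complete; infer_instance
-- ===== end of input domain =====

-- B drops A's search for the first '.' entirely: it counts the free blocks and checks that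
-- the suffix of exactly that length is all '.'; objective: alternative (same cost).

-- ===== PORT A =====
-- A's first loop: enumerate with break, returning the index of the first '.'
def pvFindFirstDot : List String → Nat → Option Nat
  | [], _ => none
  | b :: rest, i => if b = "." then some i else pvFindFirstDot rest (i + 1)

-- A's second loop: for idx in range(first_dot+1, len(layout)): if layout[idx] != '.': return False
def pvCheckTail (layout : List String) : List Nat → Bool
  | [] => true
  | i :: rest => if layout.getD i "" ≠ "." then false else pvCheckTail layout rest

def is_compaction_complete (layout : List String) : Bool :=
  match pvFindFirstDot layout 0 with
  | none => true
  | some fd => pvCheckTail layout (List.range' (fd + 1) (layout.length - (fd + 1)))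

-- ===== PORT B =====
-- free = layout.count('.'); all(b == '.' for b in layout[len(layout)-free:])
def is_compaction_complete_alt (layout : List String) : Bool :=
  let free := PySem.List.count layout "."
  (PySem.List.slice layout (some ((layout.length : Int) - (free : Int))) none).all (· == ".")

-- ===== PRECONDITION & SPEC =====
def Spec_is_compaction_complete (layout : List String) (out : Bool) : Prop := out = is_compaction_complete_alt layout
instance (layout : List String) (out : Bool) : Decidable (Spec_is_compaction_complete layout out) := by unfold Spec_is_compaction_complete; infer_instance

-- ===== CLAIM (what is proved, stated in full; the proofs are below) =====
def Claim_equal_is_compaction_complete : Prop := ∀ (layout : List String), Dom_is_compaction_complete layout → Spec_is_compaction_complete layout (is_compaction_complete layout)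

-- ===== LEMMAS AND PROOFS =====

-- canonical form both sides are reduced to: the part from the first '.' on is all '.'
def pvCanon (l : List String) : Bool := (l.dropWhile (fun s => !(s == "."))).all (· == ".")

-- A's tail check over the index range starting right after a prefix equals the all-dots test
lemma pvCheckTail_range' (l p : List String) :
    pvCheckTail (p ++ l) (List.range' p.length l.length) = l.all (· == ".") := by
  induction l generalizing p with
  | nil => rfl
  | cons b rest ih =>
      have hget : (p ++ b :: rest).getD p.length "" = b := by
        simp [List.getD]
      have hsplit : p ++ b :: rest = (p ++ [b]) ++ rest := by simp
      have hih := ih (p ++ [b])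
      rw [show (p ++ [b]).length = p.length + 1 from by simp, ← hsplit] at hih
      show pvCheckTail (p ++ b :: rest) (List.range' p.length (rest.length + 1)) = _
      rw [List.range'_succ, pvCheckTail, hget]
      by_cases hb : b = "."
      · subst hb; simp [hih]
      · simp [hb]

-- A on p ++ l, the first-dot search started at index p.length, equals the canonical form of l
lemma pvA_canon (l p : List String) :
    (match pvFindFirstDot l p.length with
     | none => true
     | some fd => pvCheckTail (p ++ l) (List.range' (fd + 1) ((p ++ l).length - (fd + 1)))) =
    pvCanon l := by
  induction l generalizing p with
  | nil => rfl
  | cons b rest ih =>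
      by_cases hb : b = "."
      · subst hb
        have hlen : p.length + (rest.length + 1) - (p.length + 1) = rest.length := by omega
        have hsplit : p ++ "." :: rest = (p ++ ["."]) ++ rest := by simp
        have h := pvCheckTail_range' rest (p ++ ["."])
        rw [show (p ++ ["."]).length = p.length + 1 from by simp, ← hsplit] at h
        simp [pvFindFirstDot, pvCanon, List.dropWhile, hlen, h]
      · have hsplit : p ++ b :: rest = (p ++ [b]) ++ rest := by simp
        have hih := ih (p ++ [b])
        rw [show (p ++ [b]).length = p.length + 1 from by simp, ← hsplit] at hih
        have hbeq : (b == ".") = false := by simp [hb]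
        simp only [pvFindFirstDot, if_neg hb, hih]
        simp [pvCanon, List.dropWhile, hbeq]

-- all-dots in terms of count
lemma pvAllDot_iff (l : List String) : (l.all (· == ".") = true) ↔ l.count "." = l.length := by
  rw [List.count_eq_length, List.all_eq_true]
  constructor
  · intro h b hb; exact ((by simpa using h b hb) : b = ".").symm
  · intro h b hb; simpa using (h b hb).symm

-- on a list starting with '.', the all-dots test of the suffix of length count equals all-dots
lemma pvSuffix_all (d : List String) (hhead : ∀ b, d.head? = some b → b = ".") :
    (d.drop (d.length - d.count ".")).all (· == ".") = d.all (· == ".") := by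
  by_cases hall : d.all (· == ".") = true
  · have hc : d.count "." = d.length := (pvAllDot_iff d).mp hall
    simp [hc, hall]
  · have hf : d.all (· == ".") = false := Bool.eq_false_iff.mpr hall
    rw [hf, Bool.eq_false_iff]
    intro habs
    have hc : d.count "." ≤ d.length := List.count_le_length
    set k := d.length - d.count "." with hk
    have hlen : (d.drop k).length = d.count "." := by simp [hk]; omega
    have hcd : (d.drop k).count "." = d.count "." := by
      rw [← hlen]; exact (pvAllDot_iff _).mp habs
    have hsplit : d.count "." = (d.take k).count "." + (d.drop k).count "." := by
      conv_lhs => rw [← List.take_append_drop k d]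
      exact List.count_append ..
    have htz : (d.take k).count "." = 0 := by omega
    have hk0 : k = 0 := by
      by_contra hne
      obtain ⟨m, hm⟩ := Nat.exists_eq_succ_of_ne_zero hne
      cases d with
      | nil => exact hne (by simp [hk])
      | cons b rest =>
        have hb : b = "." := hhead b rfl
        have hmem : "." ∈ (b :: rest).take k := by
          rw [hm]; simp [List.take_succ_cons, hb]
        have := List.count_pos_iff.mpr hmem
        omega
    have : d.count "." = d.length := by omega
    exact hall ((pvAllDot_iff d).mpr this)

-- dropping the prefix that holds no '.' commutes with the suffix-of-length-count view
lemma pvDrop_helper (t d : List String) (htc : t.count "." = 0) :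
    (t ++ d).drop ((t ++ d).length - (t ++ d).count ".") = d.drop (d.length - d.count ".") := by
  have hdc : d.count "." ≤ d.length := List.count_le_length
  rw [List.length_append, List.count_append, htc,
    show t.length + d.length - (0 + d.count ".") = t.length + (d.length - d.count ".") from by omega,
    List.drop_append]
  simp

-- B (suffix of length count '.') equals the canonical form
lemma pvB_canon (l : List String) :
    (l.drop (l.length - l.count ".")).all (· == ".") = pvCanon l := by
  set p : String → Bool := fun s => !(s == ".") with hp
  set t := l.takeWhile p with ht
  set d := l.dropWhile p with hd
  have hsplit : t ++ d = l := List.takeWhile_append_dropWhile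
  have htc : t.count "." = 0 := by
    rw [List.count_eq_zero]
    intro hmem
    have := List.mem_takeWhile_imp (ht ▸ hmem)
    simp [hp] at this
  have hhead : ∀ b, d.head? = some b → b = "." := by
    intro b hb
    have hne : l.dropWhile p ≠ [] := by rw [← hd]; intro h; rw [h] at hb; cases hb
    have hnot := List.head_dropWhile_not p hne
    have hbh : (l.dropWhile p).head hne = b := by
      have h1 : (l.dropWhile p).head? = some b := hd ▸ hb
      have h2 : (l.dropWhile p).head? = some ((l.dropWhile p).head hne) :=
        List.head?_eq_some_head hne
      exact Option.some.inj (h2.symm.trans h1)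
    rw [hbh] at hnot
    simpa [hp] using hnot
  rw [pvCanon, ← hp, ← hd, ← hsplit, pvDrop_helper t d htc]
  exact pvSuffix_all d hhead

theorem is_compaction_complete_spec : Claim_equal_is_compaction_complete := by
  intro layout _
  unfold Spec_is_compaction_complete is_compaction_complete is_compaction_complete_alt
  show _ = (PySem.List.slice layout
      (some ((layout.length : Int) - (PySem.List.count layout "." : Int)))).all (· == ".")
  have hle : layout.count "." ≤ layout.length := List.count_le_length
  have hnn : (0:Int) ≤ (layout.length : Int) - (PySem.List.count layout "." : Int) := by
    rw [PySem.List.count_eq]; omega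
  rw [PySem.List.slice_from layout hnn]
  rw [show ((layout.length : Int) - (PySem.List.count layout "." : Int)).toNat =
      layout.length - layout.count "." from by rw [PySem.List.count_eq]; omega]
  rw [pvB_canon]
  simpa using pvA_canon layout []
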